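-- pv_equiv track=rewrite | github.com/DunZhang/DomainSpecificThesaurus | build/lib/DST/word_discrimination/WordDiscrimination.py | __checkLetterOrder
-- ===== SOURCE A (Python) =====
-- def __checkLetterOrder(shortTerm, longTerm):
--     position = 0  # record the position of letter
--     matchCount = 0  # how many letters in the short term are ordered as those in long term
--     # do not take "-" and "_" into consideration
--     for letter in shortTerm:
--         addPosition = longTerm[position:].find(letter)
--         if addPosition == -1:
--             break
--         else:
--             matchCount = matchCount + 1
--         position = position + addPosition + 1
--     if matchCount == len(shortTerm):
--         # if the abbreviation only refer to the the first word in long term, it is not the abbreviation of the whole term such as advace --> advace_mike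
--         # the last position of the blank i.e., the letters in an abbreviation should lay in all components in the words
--         if " " in longTerm and position < longTerm.rfind(" ") + 1 and (shortTerm[-1] != longTerm.split(" ")[-1][
--             0]):  # note that the position of " " should add 1 because of the earlier program
--             # print shortTerm, "," , longTerm
--             return False
--         else:
--             return True
--     else:
--         return False
-- ===== SOURCE B (Python) =====
-- def __checkLetterOrder(shortTerm, longTerm):
--     # Index every letter's occurrence positions in longTerm once, then binary-search
--     # (hand-rolled lower bound) the next usable occurrence for each letter of
--     # shortTerm; finally the same whole-term heuristic as the original.
--     positions = {}
--     for i, ch in enumerate(longTerm):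
--         positions.setdefault(ch, []).append(i)
--     j = 0  # next usable index in longTerm
--     for ch in shortTerm:
--         lst = positions.get(ch)
--         if lst is None:
--             return False
--         lo, hi = 0, len(lst)
--         while lo < hi:  # lower bound: first k with lst[k] >= j
--             mid = (lo + hi) // 2
--             if lst[mid] < j:
--                 lo = mid + 1
--             else:
--                 hi = mid
--         if lo == len(lst):
--             return False
--         j = lst[lo] + 1
--     if " " not in longTerm:
--         return True
--     return j > longTerm.rfind(" ") or shortTerm[-1] == longTerm.split(" ")[-1][0]
-- ===== Notes on version B (the rewrite author's own statement) =====
-- stated objective: faster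
-- what changed: Instead of re-scanning with longTerm[position:].find(letter) for every letter (each call slices and scans the rest of longTerm), B builds a per-character occurrence-position index of longTerm once and binary-searches (hand-rolled lower bound) the next usable occurrence for each letter of shortTerm.
import Mathlib
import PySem

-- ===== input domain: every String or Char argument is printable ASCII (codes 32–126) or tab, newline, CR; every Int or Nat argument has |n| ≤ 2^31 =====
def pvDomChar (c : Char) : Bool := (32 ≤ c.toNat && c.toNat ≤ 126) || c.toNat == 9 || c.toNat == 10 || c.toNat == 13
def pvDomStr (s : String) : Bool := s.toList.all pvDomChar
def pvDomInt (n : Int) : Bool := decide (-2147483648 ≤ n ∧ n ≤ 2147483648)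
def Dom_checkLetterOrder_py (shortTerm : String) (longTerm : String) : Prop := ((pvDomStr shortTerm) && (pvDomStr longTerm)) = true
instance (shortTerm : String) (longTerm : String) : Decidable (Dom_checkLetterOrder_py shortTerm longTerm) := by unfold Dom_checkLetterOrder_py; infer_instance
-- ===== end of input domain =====

-- B replaces A's per-letter slice+find rescans with a one-time per-letter position index of
-- longTerm plus a hand-rolled binary search (lower bound) for the next usable occurrence
-- (objective: faster — a timing run measures whether that holds at the large sizes).

-- ===== PORT A =====
-- the for-loop over shortTerm: state (position, matchCount); break ports as returning the state
def aLoop : List Char → List Char → Int → Int → Int × Int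
  | [], _, pos, mc => (pos, mc)
  | c :: rest, ll, pos, mc =>
    let addPosition := PySem.Chars.find (PySem.List.slice ll (some pos) none) [c]
    if addPosition = -1 then (pos, mc)
    else aLoop rest ll (pos + addPosition + 1) (mc + 1)

def checkLetterOrder_py (shortTerm : String) (longTerm : String) : Bool :=
  let ls := shortTerm.toList
  let ll := longTerm.toList
  let r := aLoop ls ll 0 0
  if r.2 = (ls.length : Int) then
    -- shortTerm[-1] != longTerm.split(" ")[-1][0]: both indexings via pyGet? (none = IndexError, excluded by Pre_)
    if PySem.Chars.isIn [' '] ll && decide (r.1 < PySem.Chars.rfind ll [' '] + 1) &&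
       !(PySem.List.pyGet? ls (-1) ==
         (PySem.List.pyGet? (PySem.Chars.splitOn ll [' ']) (-1)).bind (fun w => PySem.List.pyGet? w 0))
    then false
    else true
  else false

-- ===== PORT B =====
-- positions.setdefault(ch, []).append(i): present → append in place, absent → new key at the end;
-- ported as insert of (getD ++ [i]) (PySem.Dict.insert overwrites keeping the key's position)
def bBuild (ll : List Char) : PySem.Dict Char (List Int) :=
  (PySem.List.enumerate ll 0).foldl
    (fun d p => d.insert p.2 (d.getD p.2 [] ++ [p.1])) PySem.Dict.empty

-- the while loop 'lo, hi = 0, len(lst); while lo < hi: …' (hand-rolled lower bound in Source B)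
def bLB (lst : List Int) (x : Int) (lo hi : Nat) : Nat :=
  if lo < hi then
    let mid := (lo + hi) / 2
    if lst.getD mid 0 < x then bLB lst x (mid + 1) hi else bLB lst x lo mid
  else lo
termination_by hi - lo

-- the for-loop over shortTerm; none = the early 'return False'
def bLoop : List Char → PySem.Dict Char (List Int) → Int → Option Int
  | [], _, j => some j
  | c :: rest, d, j =>
    match d.get? c with
    | none => none
    | some lst =>
      let lo := bLB lst j 0 lst.length
      if lo = lst.length then none
      else bLoop rest d (lst.getD lo 0 + 1)

def checkLetterOrder_py_alt (shortTerm : String) (longTerm : String) : Bool :=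
  let ls := shortTerm.toList
  let ll := longTerm.toList
  let d := bBuild ll
  match bLoop ls d 0 with
  | none => false
  | some j =>
    if !(PySem.Chars.isIn [' '] ll) then true
    else
      decide (j > PySem.Chars.rfind ll [' ']) ||
      (PySem.List.pyGet? ls (-1) ==
        (PySem.List.pyGet? (PySem.Chars.splitOn ll [' ']) (-1)).bind (fun w => PySem.List.pyGet? w 0))

-- ===== PRECONDITION & SPEC =====
-- Pre_ excludes EXACTLY the inputs on which the Python A raises IndexError: shortTerm[-1] when
-- shortTerm is empty and longTerm contains ' ', and split(" ")[-1][0] when longTerm ends with ' '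
-- (last component empty) and that branch is reached, i.e. shortTerm is a subsequence of
-- longTerm minus its final ' ' (the greedy scan then matches fully, ending at or before the last space).
def Pre_checkLetterOrder_py (shortTerm : String) (longTerm : String) : Prop :=
  ¬ (PySem.Chars.isIn [' '] longTerm.toList = true ∧
     (shortTerm.toList = [] ∨
      (PySem.Chars.endswith longTerm.toList [' '] = true ∧
       shortTerm.toList.isSublist longTerm.toList.dropLast = true)))
instance (shortTerm : String) (longTerm : String) : Decidable (Pre_checkLetterOrder_py shortTerm longTerm) := by unfold Pre_checkLetterOrder_py; infer_instance

def pvWitness_checkLetterOrder_py : String × String := ("am", "advance mike")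

def Spec_checkLetterOrder_py (shortTerm : String) (longTerm : String) (out : Bool) : Prop := out = checkLetterOrder_py_alt shortTerm longTerm
instance (shortTerm : String) (longTerm : String) (out : Bool) : Decidable (Spec_checkLetterOrder_py shortTerm longTerm out) := by unfold Spec_checkLetterOrder_py; infer_instance

-- ===== CLAIM (what is proved, stated in full; the proofs are below) =====
def Claim_equal_checkLetterOrder_py : Prop := ∀ (shortTerm : String) (longTerm : String), Dom_checkLetterOrder_py shortTerm longTerm → Pre_checkLetterOrder_py shortTerm longTerm → Spec_checkLetterOrder_py shortTerm longTerm (checkLetterOrder_py shortTerm longTerm)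

-- ===== LEMMAS AND PROOFS =====

theorem singleton_prefix_iff {c : Char} {u : List Char} : [c] <+: u ↔ u.head? = some c := by
  cases u with
  | nil => simp
  | cons x xs =>
    constructor
    · rintro ⟨t, ht⟩; simp at ht; simp [ht.1]
    · intro h; simp at h; exact ⟨xs, by simp [h]⟩

-- proof-side gadget: the index of the first occurrence of c in ll at or after j (ll.length if none)
def bWhile (ll : List Char) (c : Char) (j : Nat) : Nat :=
  if h : j < ll.length then
    if ll[j] = c then j else bWhile ll c (j + 1)
  else j
termination_by ll.length - j

theorem bWhile_ge (ll : List Char) (c : Char) (j : Nat) : j ≤ bWhile ll c j := by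
  fun_induction bWhile with
  | case1 => omega
  | case2 j h hc ih => omega
  | case3 => omega

theorem bWhile_le (ll : List Char) (c : Char) (j : Nat) (hj : j ≤ ll.length) :
    bWhile ll c j ≤ ll.length := by
  fun_induction bWhile with
  | case1 j h hc => omega
  | case2 j h hc ih => exact ih (by omega)
  | case3 j h => omega

theorem bWhile_spec (ll : List Char) (c : Char) (j : Nat) :
    (∀ i, j ≤ i → i < bWhile ll c j → ll[i]? ≠ some c) ∧
    (bWhile ll c j < ll.length → ll[bWhile ll c j]? = some c) := by
  fun_induction bWhile with
  | case1 j h hc =>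
    exact ⟨fun i h1 h2 => absurd h2 (by omega), fun _ => by simp [List.getElem?_eq_getElem h, hc]⟩
  | case2 j h hc ih =>
    obtain ⟨ih1, ih2⟩ := ih
    refine ⟨fun i h1 h2 => ?_, ih2⟩
    rcases Nat.eq_or_lt_of_le h1 with rfl | h1'
    · simp [List.getElem?_eq_getElem h]; exact fun e => hc (by simp [e])
    · exact ih1 i h1' h2
  | case3 j h =>
    exact ⟨fun i h1 h2 => absurd h2 (by omega), fun hlt => absurd hlt (by omega)⟩

-- A's find on a slice discovers exactly the first occurrence at or after j
theorem find_drop_eq (ll : List Char) (c : Char) (j : Nat) (hj : j ≤ ll.length) :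
    PySem.Chars.find (ll.drop j) [c] =
      (if bWhile ll c j < ll.length then ((bWhile ll c j : Int) - j) else -1) := by
  obtain ⟨h1, h2⟩ := bWhile_spec ll c j
  by_cases hb : bWhile ll c j < ll.length
  · simp only [hb, if_pos]
    have hocc : [c] <+: (ll.drop j).drop (bWhile ll c j - j) := by
      rw [List.drop_drop, singleton_prefix_iff, List.head?_drop]
      have e : j + (bWhile ll c j - j) = bWhile ll c j := by
        have := bWhile_ge ll c j; omega
      rw [e]; exact h2 hb
    have hmin : ∀ i, i < bWhile ll c j - j → ¬ [c] <+: (ll.drop j).drop i := by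
      intro i hi
      rw [List.drop_drop, singleton_prefix_iff, List.head?_drop]
      exact fun e => h1 (j + i) (by omega) (by omega) e
    have hne : PySem.Chars.find (ll.drop j) [c] ≠ -1 := by
      rw [PySem.Chars.find_ne_neg_one_iff]
      have hcmem : c ∈ ll.drop j :=
        (hocc.sublist.trans (List.drop_sublist _ _)).subset (by simp)
      exact (List.singleton_infix_iff c _).mpr hcmem
    have hge : 0 ≤ PySem.Chars.find (ll.drop j) [c] := by
      have := PySem.Chars.neg_one_le_find (ll.drop j) [c]; omega
    obtain ⟨hpre, hmin'⟩ := PySem.Chars.find_spec (s := ll.drop j) (sub := [c]) hge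
    set f := PySem.Chars.find (ll.drop j) [c] with hf
    have e1 : ¬ f.toNat < bWhile ll c j - j := fun h => hmin _ h hpre
    have e2 : ¬ bWhile ll c j - j < f.toNat := fun h => hmin' _ h hocc
    have : f.toNat = bWhile ll c j - j := by omega
    have := bWhile_ge ll c j
    omega
  · rw [if_neg hb, PySem.Chars.find_eq_neg_one_iff]
    intro hinf
    obtain ⟨pre, suf, he⟩ := hinf
    have hpre : [c] <+: (ll.drop j).drop pre.length := by
      rw [← he, List.append_assoc, List.drop_left' rfl]; exact ⟨suf, rfl⟩
    rw [List.drop_drop, singleton_prefix_iff, List.head?_drop] at hpre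
    have hb' := bWhile_le ll c j hj
    have hidx : j + pre.length < ll.length := by
      by_contra hge
      rw [List.getElem?_eq_none (by omega)] at hpre; simp at hpre
    exact h1 (j + pre.length) (by omega) (by omega) hpre

-- the sorted occurrence list of c in ll
def occ (ll : List Char) (c : Char) : List Int :=
  ((PySem.List.enumerate ll 0).filter (fun p => p.2 == c)).map Prod.fst

theorem fold_get? (ps : List (Int × Char)) (c : Char) : ∀ (d : PySem.Dict Char (List Int)),
    (ps.foldl (fun d p => d.insert p.2 (d.getD p.2 [] ++ [p.1])) d).get? c =
    (if (ps.filter (fun p => p.2 == c)).map Prod.fst = [] then d.get? c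
     else some (d.getD c [] ++ (ps.filter (fun p => p.2 == c)).map Prod.fst)) := by
  induction ps with
  | nil => simp
  | cons p ps ih =>
    intro d
    simp only [List.foldl_cons, List.filter_cons]
    by_cases h : p.2 = c
    · simp only [h, beq_self_eq_true, if_pos, List.map_cons]
      rw [ih]
      rw [PySem.Dict.getD_insert, PySem.Dict.get?_insert]
      by_cases hr : (ps.filter (fun p => p.2 == c)).map Prod.fst = []
      · simp [hr]
      · simp [hr]
    · have hb : (p.2 == c) = false := by simp [h]
      simp only [hb, Bool.false_eq_true]
      rw [ih]
      rw [PySem.Dict.getD_insert, PySem.Dict.get?_insert]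
      have h' : ¬ (c = p.2) := fun e => h e.symm
      simp [h']


theorem bBuild_get? (ll : List Char) (c : Char) :
    (bBuild ll).get? c = if occ ll c = [] then none else some (occ ll c) := by
  unfold bBuild occ
  rw [fold_get?]
  by_cases hr : ((PySem.List.enumerate ll 0).filter (fun p => p.2 == c)).map Prod.fst = []
  · simp [hr]
  · simp [hr]


theorem occ_pairwise (ll : List Char) (c : Char) : (occ ll c).Pairwise (· < ·) := by
  unfold occ
  rw [List.pairwise_map]
  exact (PySem.List.pairwise_lt_enumerate ll 0).sublist List.filter_sublist


theorem mem_occ (ll : List Char) (c : Char) (x : Int) :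
    x ∈ occ ll c ↔ ∃ k : Nat, k < ll.length ∧ x = (k : Int) ∧ ll[k]? = some c := by
  unfold occ
  simp only [List.mem_map, List.mem_filter]
  constructor
  · rintro ⟨p, ⟨hmem, hc⟩, rfl⟩
    rw [PySem.List.mem_enumerate_iff] at hmem
    obtain ⟨k, hk, rfl⟩ := hmem
    refine ⟨k, hk, by simp, ?_⟩
    simp only [beq_iff_eq] at hc
    simp [List.getElem?_eq_getElem hk, hc]
  · rintro ⟨k, hk, rfl, hkc⟩
    refine ⟨((k : Int), ll[k]), ⟨?_, ?_⟩, rfl⟩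
    · rw [PySem.List.mem_enumerate_iff]
      exact ⟨k, hk, by simp⟩
    · rw [List.getElem?_eq_getElem hk] at hkc
      simp at hkc; simp [hkc]


theorem pairwise_mono (lst : List Int) (hp : lst.Pairwise (· < ·)) (i j : Nat)
    (hij : i ≤ j) (hj : j < lst.length) : lst[i]'(by omega) ≤ lst[j] := by
  rcases Nat.eq_or_lt_of_le hij with rfl | h
  · exact le_refl _
  · exact le_of_lt ((List.pairwise_iff_getElem.mp hp) i j (by omega) hj h)


theorem bLB_spec (lst : List Int) (x : Int) (hp : lst.Pairwise (· < ·)) (lo hi : Nat) :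
    lo ≤ hi → hi ≤ lst.length →
    (∀ i (h : i < lst.length), i < lo → lst[i] < x) →
    (∀ i (h : i < lst.length), hi ≤ i → x ≤ lst[i]) →
    bLB lst x lo hi ≤ lst.length ∧
    (∀ i (h : i < lst.length), i < bLB lst x lo hi → lst[i] < x) ∧
    (∀ i (h : i < lst.length), bLB lst x lo hi ≤ i → x ≤ lst[i]) := by
  fun_induction bLB lst x lo hi with
  | case1 lo hi hlt mid hmidlt ih =>
    intro h1 h2 inv1 inv2
    have hmid : mid < lst.length := by simp only [mid]; omega
    have hmid' : lst[mid] < x := by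
      rw [List.getD_eq_getElem?_getD, List.getElem?_eq_getElem hmid] at hmidlt
      simpa using hmidlt
    refine ih (by simp only [mid]; omega) h2 ?_ inv2
    intro i h hi'
    calc lst[i] ≤ lst[mid] := pairwise_mono lst hp i mid (by omega) hmid
    _ < x := hmid'
  | case2 lo hi hlt mid hmidge ih =>
    intro h1 h2 inv1 inv2
    have hmid : mid < lst.length := by simp only [mid]; omega
    have hmid' : x ≤ lst[mid] := by
      rw [List.getD_eq_getElem?_getD, List.getElem?_eq_getElem hmid] at hmidge
      simp at hmidge; omega
    refine ih (by simp only [mid]; omega) (by omega) inv1 ?_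
    intro i h hi'
    calc x ≤ lst[mid] := hmid'
    _ ≤ lst[i] := pairwise_mono lst hp mid i hi' h
  | case3 lo hi hge =>
    intro h1 h2 inv1 inv2
    exact ⟨by omega, inv1, fun i h hi' => inv2 i h (by omega)⟩


theorem bLoop_cons_eq (ll : List Char) (c : Char) (rest : List Char) (jn : Nat)
    (hj : jn ≤ ll.length) :
    bLoop (c :: rest) (bBuild ll) (jn : Int) =
      if bWhile ll c jn < ll.length then bLoop rest (bBuild ll) ((bWhile ll c jn + 1 : Nat) : Int)
      else none := by
  obtain ⟨hw1, hw2⟩ := bWhile_spec ll c jn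
  have hwge := bWhile_ge ll c jn
  have hwle := bWhile_le ll c jn hj
  have hocc := bBuild_get? ll c
  by_cases he : occ ll c = []
  · rw [he, if_pos rfl] at hocc
    simp only [bLoop, hocc]
    have hnw : ¬ bWhile ll c jn < ll.length := by
      intro hw
      have : ((bWhile ll c jn : Nat) : Int) ∈ occ ll c :=
        (mem_occ ll c _).mpr ⟨bWhile ll c jn, hw, rfl, hw2 hw⟩
      rw [he] at this; simp at this
    rw [if_neg hnw]
  · rw [if_neg he] at hocc
    simp only [bLoop, hocc]
    set os := occ ll c with hos
    obtain ⟨hr1, hr2, hr3⟩ := bLB_spec os (jn : Int) (occ_pairwise ll c) 0 os.length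
      (by omega) (le_refl _) (by omega) (fun i h hi => absurd hi (by omega))
    set r := bLB os (jn : Int) 0 os.length with hrdef
    by_cases hre : r = os.length
    · rw [if_pos hre]
      have hnw : ¬ bWhile ll c jn < ll.length := by
        intro hw
        have hmem : ((bWhile ll c jn : Nat) : Int) ∈ os :=
          (mem_occ ll c _).mpr ⟨bWhile ll c jn, hw, rfl, hw2 hw⟩
        obtain ⟨i, hi, hieq⟩ := List.mem_iff_getElem.mp hmem
        have := hr2 i hi (by omega)
        rw [hieq] at this
        omega
      rw [if_neg hnw]
    · rw [if_neg hre]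
      have hrlt : r < os.length := by omega
      have hmemr : os[r] ∈ os := List.getElem_mem _
      obtain ⟨k, hk, hkeq, hkc⟩ := (mem_occ ll c _).mp hmemr
      have hjk : (jn : Int) ≤ os[r] := hr3 r hrlt (le_refl _)
      have hjk' : jn ≤ k := by rw [hkeq] at hjk; exact_mod_cast hjk
      have hwlt : bWhile ll c jn < ll.length := by
        rcases Nat.lt_or_ge k (bWhile ll c jn) with h | h
        · exact absurd hkc (hw1 k hjk' h)
        · omega
      rw [if_pos hwlt]
      -- os[r] = bWhile ll c jn
      have hmemw : ((bWhile ll c jn : Nat) : Int) ∈ os :=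
        (mem_occ ll c _).mpr ⟨bWhile ll c jn, hwlt, rfl, hw2 hwlt⟩
      obtain ⟨i, hi, hieq⟩ := List.mem_iff_getElem.mp hmemw
      have hri : r ≤ i := by
        by_contra hlt
        have := hr2 i hi (by omega)
        rw [hieq] at this
        omega
      have h1 : os[r] ≤ ((bWhile ll c jn : Nat) : Int) := by
        have := pairwise_mono os (occ_pairwise ll c) r i hri hi
        rw [hieq] at this; exact this
      have h2 : ((bWhile ll c jn : Nat) : Int) ≤ os[r] := by
        rw [hkeq]
        have : bWhile ll c jn ≤ k := by
          by_contra hgt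
          exact (hw1 k hjk' (by omega)) hkc
        exact_mod_cast this
      have heqw : os[r] = ((bWhile ll c jn : Nat) : Int) := le_antisymm h1 h2
      have hgetD : os.getD r 0 = os[r] := by
        rw [List.getD_eq_getElem?_getD, List.getElem?_eq_getElem hrlt]; rfl
      rw [hgetD, heqw]
      norm_cast


theorem loop_rel (rest ll : List Char) : ∀ (jn : Nat) (mc : Int), jn ≤ ll.length →
    (match bLoop rest (bBuild ll) (jn : Int) with
     | some j' => aLoop rest ll (jn : Int) mc = (j', mc + rest.length)
     | none => (aLoop rest ll (jn : Int) mc).2 < mc + rest.length) := by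
  induction rest with
  | nil => intro jn mc hj; simp [bLoop, aLoop]
  | cons c rs ih =>
    intro jn mc hj
    have hslice : PySem.List.slice ll (some (jn : Int)) none = ll.drop jn :=
      PySem.List.slice_from_natCast ll jn
    have hfind := find_drop_eq ll c jn hj
    have hbl := bLoop_cons_eq ll c rs jn hj
    by_cases hb : bWhile ll c jn < ll.length
    · have hstep : aLoop (c :: rs) ll (jn : Int) mc
          = aLoop rs ll ((bWhile ll c jn + 1 : Nat) : Int) (mc + 1) := by
        simp only [aLoop, hslice, hfind, hb, if_pos]
        have hne : ((bWhile ll c jn : Int) - jn) ≠ -1 := by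
          have := bWhile_ge ll c jn; omega
        simp only [hne]
        push_cast
        ring_nf
      rw [if_pos hb] at hbl
      have := ih (bWhile ll c jn + 1) (mc + 1) (by omega)
      rw [hbl, hstep]
      cases hB : bLoop rs (bBuild ll) ((bWhile ll c jn + 1 : Nat) : Int) with
      | some j' =>
        simp only [hB] at this ⊢
        rw [this, Prod.mk.injEq]
        exact ⟨rfl, by simp only [List.length_cons]; push_cast; ring⟩
      | none =>
        simp only [hB] at this ⊢
        simp only [List.length_cons]
        push_cast at this ⊢
        omega
    · have hstop : aLoop (c :: rs) ll (jn : Int) mc = ((jn : Int), mc) := by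
        simp only [aLoop, hslice, hfind]
        rw [if_neg hb]
        simp
      rw [if_neg hb] at hbl
      rw [hbl, hstop]
      simp


-- ===== VERDICT (by name: the statement is the Claim_ definition above) =====
theorem checkLetterOrder_py_spec : Claim_equal_checkLetterOrder_py := by
  intro shortTerm longTerm _ _
  unfold Spec_checkLetterOrder_py checkLetterOrder_py checkLetterOrder_py_alt
  have h := loop_rel shortTerm.toList longTerm.toList 0 0 (by omega)
  cases hB : bLoop shortTerm.toList (bBuild longTerm.toList) ((0 : Nat) : Int) with
  | some j =>
    simp only [Nat.cast_zero] at h hB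
    simp only [hB] at h ⊢
    rw [h]
    simp only [zero_add, if_true]
    cases hin : PySem.Chars.isIn [' '] longTerm.toList with
    | false => simp
    | true =>
      simp only [Bool.true_and]
      by_cases hgt : j > PySem.Chars.rfind longTerm.toList [' ']
      · have : ¬ (j < PySem.Chars.rfind longTerm.toList [' '] + 1) := by omega
        simp [this, hgt]
      · have : (j < PySem.Chars.rfind longTerm.toList [' '] + 1) := by omega
        by_cases hX : PySem.List.pyGet? shortTerm.toList (-1) =
            (PySem.List.pyGet? (PySem.Chars.splitOn longTerm.toList [' ']) (-1)).bind
              (fun w => PySem.List.pyGet? w 0)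
        · simp [this, hgt, hX]
        · simp [this, hgt, hX]
  | none =>
    simp only [Nat.cast_zero] at h hB
    simp only [hB] at h ⊢
    have hne : (aLoop shortTerm.toList longTerm.toList 0 0).2 ≠ (shortTerm.toList.length : Int) := by
      omega
    simp only [String.length_toList] at hne
    simp [hne]
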